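-- pv_equiv track=rewrite | github.com/RemyFevry/kittiwake | src/kittiwake/utils/keybindings.py | format_binding
-- ===== SOURCE A (Python) =====
-- def format_binding(key: str) -> str:
--     """Format key for display."""
--     # Convert key to human-readable format
--     replacements = {
--         "ctrl+": "Ctrl+",
--         "shift+": "Shift+",
--         "tab": "Tab",
--         "space": "Space",
--         "enter": "Enter",
--         "esc": "Escape",
--     }
--
--     formatted = key
--     for old, new in replacements.items():
--         formatted = formatted.replace(old, new)
--
--     return formatted
-- ===== SOURCE B (Python) =====
-- _TABLE = [("ctrl+", "Ctrl+"), ("shift+", "Shift+"), ("tab", "Tab"),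
--           ("space", "Space"), ("enter", "Enter"), ("esc", "Escape")]
--
--
-- def format_binding(key: str) -> str:
--     """Format key for display."""
--     def apply(s, table):
--         if not table:
--             return s
--         old, new = table[0]
--         return apply(new.join(s.split(old)), table[1:])
--     return apply(key, _TABLE)
-- ===== Notes on version B (the rewrite author's own statement) =====
-- stated objective: alternative
-- what changed: B keeps the six sequential passes but replaces the str.replace loop by a recursion over the replacement table that rebuilds the string as new.join(s.split(old)) at each step (split/join instead of replace, recursion instead of a for-loop).
import Mathlib
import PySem

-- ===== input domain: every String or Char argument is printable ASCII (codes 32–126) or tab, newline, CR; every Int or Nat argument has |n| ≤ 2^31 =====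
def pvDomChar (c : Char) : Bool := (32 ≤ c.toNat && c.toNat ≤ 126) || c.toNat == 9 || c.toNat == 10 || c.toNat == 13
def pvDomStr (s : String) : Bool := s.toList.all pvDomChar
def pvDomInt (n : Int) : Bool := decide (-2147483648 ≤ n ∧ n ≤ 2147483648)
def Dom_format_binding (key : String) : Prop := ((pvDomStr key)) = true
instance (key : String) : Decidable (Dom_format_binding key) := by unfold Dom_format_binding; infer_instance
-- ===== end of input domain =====

-- B applies the same six passes by recursing over the replacement table and rebuilding the
-- string as new.join(s.split(old)) instead of looping with str.replace; return values agree
-- on every input (no mutation in either version).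

-- ===== PORT A =====
def format_binding (key : String) : String :=
  -- dict literal (distinct keys, insertion order) → association list; the for-loop → foldl
  let replacements : List (String × String) :=
    [("ctrl+", "Ctrl+"), ("shift+", "Shift+"), ("tab", "Tab"),
     ("space", "Space"), ("enter", "Enter"), ("esc", "Escape")]
  let formatted := replacements.foldl (fun formatted p => PySem.Str.replace formatted p.1 p.2) key
  formatted

-- ===== PORT B =====
-- Source B's inner `apply(s, table)` recursion; `s.split(old)` for the table's (nonempty) keys is
-- PySem.Chars.splitOn and `new.join(parts)` is PySem.Chars.join, both exact here.
def applyTable : List (String × String) → String → String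
  | [], s => s
  | (old, new) :: rest, s =>
      applyTable rest (String.ofList (PySem.Chars.join new.toList (PySem.Chars.splitOn s.toList old.toList)))

def format_binding_alt (key : String) : String :=
  applyTable [("ctrl+", "Ctrl+"), ("shift+", "Shift+"), ("tab", "Tab"),
              ("space", "Space"), ("enter", "Enter"), ("esc", "Escape")] key

-- ===== PRECONDITION & SPEC =====
def Spec_format_binding (key : String) (out : String) : Prop := out = format_binding_alt key
instance (key : String) (out : String) : Decidable (Spec_format_binding key out) := by unfold Spec_format_binding; infer_instance

-- ===== CLAIM (what is proved, stated in full; the proofs are below) =====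
def Claim_equal_format_binding : Prop := ∀ (key : String), Dom_format_binding key → Spec_format_binding key (format_binding key)

-- ===== LEMMAS AND PROOFS =====

-- nice recursive characterization of Python str.replace (nonempty `old`)
def rep (old new : List Char) : List Char → List Char
  | [] => []
  | c :: t =>
    if old.isPrefixOf (c :: t) then new ++ rep old new (t.drop (old.length - 1))
    else c :: rep old new t
termination_by l => l.length
decreasing_by all_goals (simp; try omega)

lemma go_eq (old new : List Char) (hold : old ≠ []) :
    ∀ fuel (l acc : List Char), l.length ≤ fuel →
      PySem.Chars.replace.go old new fuel l acc = acc.reverse ++ rep old new l := by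
  intro fuel
  induction fuel with
  | zero =>
    intro l acc hl
    have : l = [] := List.eq_nil_of_length_eq_zero (Nat.le_zero.mp hl)
    subst this; simp [PySem.Chars.replace.go, rep]
  | succ n ih =>
    intro l acc hl
    cases l with
    | nil => simp [PySem.Chars.replace.go, rep]
    | cons c t =>
      rw [PySem.Chars.replace.go]
      by_cases h : old.isPrefixOf (c :: t)
      · have hdrop : (c :: t).drop old.length = t.drop (old.length - 1) := by
          cases old with | nil => exact absurd rfl hold | cons _ o' => simp
        rw [if_pos h, hdrop, ih _ _ (by simp at hl ⊢; omega)]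
        rw [rep, if_pos h]
        simp
      · rw [if_neg h, ih _ _ (by simp at hl ⊢; omega)]
        rw [rep, if_neg h]
        simp

lemma replace_eq (l old new : List Char) (hold : old ≠ []) :
    PySem.Chars.replace l old new = rep old new l := by
  rw [PySem.Chars.replace]
  rw [if_neg (by simpa using hold)]
  simpa using go_eq old new hold l.length l [] (le_refl _)

-- nice recursive characterization of Python str.split (nonempty separator)
def spl (old : List Char) : List Char → List (List Char)
  | [] => [[]]
  | c :: t =>
    if old.isPrefixOf (c :: t) then [] :: spl old (t.drop (old.length - 1))
    else (c :: (spl old t).headD []) :: (spl old t).tail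
termination_by l => l.length
decreasing_by all_goals (simp; try omega)

lemma spl_ne_nil (old l : List Char) : spl old l ≠ [] := by
  cases l with
  | nil => simp [spl]
  | cons c t => rw [spl]; split <;> simp

lemma intercalate_cons_cons (s a b : List Char) (l : List (List Char)) :
    List.intercalate s (a :: b :: l) = a ++ s ++ List.intercalate s (b :: l) := by
  simp [List.intercalate, List.intersperse]

-- merge an already-read chunk into the first part
def consHead (x : List Char) : List (List Char) → List (List Char)
  | [] => [x]
  | p :: ps => (x ++ p) :: ps

lemma split_go_eq (sep : List Char) (hsep : sep ≠ []) :
    ∀ fuel (l cur : List Char) (accs : List (List Char)), l.length < fuel →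
      PySem.Chars.splitOn.go sep fuel l cur accs =
        accs.reverse ++ consHead cur.reverse (spl sep l) := by
  intro fuel
  induction fuel with
  | zero => intro l cur accs hl; omega
  | succ n ih =>
    intro l cur accs hl
    cases l with
    | nil => simp [PySem.Chars.splitOn.go, spl, consHead]
    | cons c t =>
      rw [PySem.Chars.splitOn.go]
      by_cases h : sep.isPrefixOf (c :: t)
      · have hsl : 1 ≤ sep.length := by
          cases sep with | nil => exact absurd rfl hsep | cons _ o' => simp
        have hdrop : (c :: t).drop sep.length = t.drop (sep.length - 1) := by
          cases sep with | nil => exact absurd rfl hsep | cons _ o' => simp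
        rw [if_pos h, hdrop, ih _ _ _ (by
          have := List.length_drop (l := t) (i := sep.length - 1)
          simp at hl ⊢; omega)]
        rw [spl, if_pos h]
        cases hs : spl sep (List.drop (sep.length - 1) t) with
        | nil => exact absurd hs (spl_ne_nil _ _)
        | cons p ps => simp [consHead]
      · rw [if_neg h, ih _ _ _ (by simp at hl ⊢; omega)]
        rw [spl, if_neg h]
        cases hs : spl sep t with
        | nil => exact absurd hs (spl_ne_nil sep t)
        | cons p ps => simp [consHead]

lemma splitOn_eq (s sep : List Char) (hsep : sep ≠ []) :
    PySem.Chars.splitOn s sep = spl sep s := by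
  rw [PySem.Chars.splitOn, split_go_eq sep hsep (s.length + 1) s [] [] (by omega)]
  cases hs : spl sep s with
  | nil => exact absurd hs (spl_ne_nil sep s)
  | cons p ps => simp [consHead]

-- the split/join route computes exactly str.replace
lemma join_spl_eq_rep (old new : List Char) :
    ∀ l, PySem.Chars.join new (spl old l) = rep old new l := by
  intro l
  induction l using spl.induct old with
  | case1 => simp [spl, rep, PySem.Chars.join, List.intercalate]
  | case2 c t h ih =>
    rw [spl, if_pos h, rep, if_pos h]
    cases hs : spl old (t.drop (old.length - 1)) with
    | nil => exact absurd hs (spl_ne_nil _ _)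
    | cons p ps =>
      rw [hs] at ih
      simp only [PySem.Chars.join, intercalate_cons_cons] at ih ⊢
      simp [← ih]
  | case3 c t h ih =>
    rw [spl, if_neg h, rep, if_neg h]
    cases hs : spl old t with
    | nil => exact absurd hs (spl_ne_nil _ _)
    | cons p ps =>
      rw [hs] at ih
      simp only [List.headD, List.tail]
      cases ps with
      | nil => simpa [PySem.Chars.join, List.intercalate] using ih
      | cons q qs =>
        simp only [PySem.Chars.join, intercalate_cons_cons] at ih ⊢
        simp [← ih]

lemma join_split_eq_replace (s old new : List Char) (hold : old ≠ []) :
    PySem.Chars.join new (PySem.Chars.splitOn s old) = PySem.Chars.replace s old new := by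
  rw [splitOn_eq s old hold, replace_eq s old new hold, join_spl_eq_rep old new]

-- ===== VERDICT (by name: the statement is the Claim_ definition above) =====
theorem format_binding_spec : Claim_equal_format_binding := by
  intro key _
  show format_binding key = format_binding_alt key
  rw [← String.toList_inj]
  simp only [format_binding, format_binding_alt, List.foldl, applyTable,
    PySem.Str.toList_replace, String.toList_ofList]
  rw [join_split_eq_replace _ _ _ (by decide), join_split_eq_replace _ _ _ (by decide),
    join_split_eq_replace _ _ _ (by decide), join_split_eq_replace _ _ _ (by decide),
    join_split_eq_replace _ _ _ (by decide), join_split_eq_replace _ _ _ (by decide)]
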